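-- pv_equiv track=rewrite | github.com/jack-greenbaum/advent-of-code-2018 | 02/02.py | find_doubles_and_triples
-- ===== SOURCE A (Python) =====
-- from collections import defaultdict
--
-- def find_doubles_and_triples(boxes):
--     repeats = {'doubles': 0, 'triples': 0}
--     for box in boxes:
--         seen = defaultdict(int)
--         for letter in box:
--             seen[letter] += 1
--         if 2 in seen.values():
--             repeats['doubles'] += 1
--         if 3 in seen.values():
--             repeats['triples'] += 1
--     return repeats
-- ===== SOURCE B (Python) =====
-- def run_lengths(s):
--     """Set of run lengths of an already-sorted sequence, by one linear scan."""
--     runs = set()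
--     run = 0
--     prev = None
--     for c in s:
--         if c == prev:
--             run += 1
--         else:
--             if run:
--                 runs.add(run)
--             run = 1
--             prev = c
--     if run:
--         runs.add(run)
--     return runs
--
-- def find_doubles_and_triples(boxes):
--     doubles = 0
--     triples = 0
--     for box in boxes:
--         runs = run_lengths(sorted(box))
--         if 2 in runs:
--             doubles += 1
--         if 3 in runs:
--             triples += 1
--     return {'doubles': doubles, 'triples': triples}
-- ===== Notes on version B (the rewrite author's own statement) =====
-- stated objective: alternative
-- what changed: Replaces the per-box defaultdict hash-counting pass with a sort-then-scan: each box is sorted so equal letters become contiguous, one linear scan collects the run lengths into a set, and doubles/triples are bumped on 2/3 membership in that set.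
import Mathlib
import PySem

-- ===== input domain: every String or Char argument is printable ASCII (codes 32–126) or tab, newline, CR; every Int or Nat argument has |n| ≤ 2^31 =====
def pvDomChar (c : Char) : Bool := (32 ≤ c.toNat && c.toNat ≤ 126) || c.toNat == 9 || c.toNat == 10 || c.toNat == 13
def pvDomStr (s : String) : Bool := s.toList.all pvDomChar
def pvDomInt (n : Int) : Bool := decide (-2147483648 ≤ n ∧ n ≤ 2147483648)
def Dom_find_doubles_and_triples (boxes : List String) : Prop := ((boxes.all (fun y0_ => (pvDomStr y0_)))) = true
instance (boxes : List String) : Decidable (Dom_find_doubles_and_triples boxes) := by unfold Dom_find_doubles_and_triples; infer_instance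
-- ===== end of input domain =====

-- B replaces A's defaultdict hash-counting pass by sort-then-scan: each box is sorted, one linear
-- scan collects the run lengths into a set, and 2/3 membership in that set drives the counters.

-- ===== PORT A =====
def find_doubles_and_triples (boxes : List String) : List (String × Int) :=
  let repeats : PySem.Dict String Int := PySem.Dict.mk [("doubles", 0), ("triples", 0)]
  let repeats := boxes.foldl (fun rep box =>
    let seen : PySem.Dict Char Int :=
      box.toList.foldl (fun d letter => d.modify letter 0 (· + 1)) PySem.Dict.empty
    let rep := if seen.values.contains 2 then rep.insert "doubles" (rep.getD "doubles" 0 + 1) else rep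
    if seen.values.contains 3 then rep.insert "triples" (rep.getD "triples" 0 + 1) else rep) repeats
  repeats.items

-- ===== PORT B =====
-- one step of run_lengths' scan: state = (runs, run, prev)
def rlStep (st : PySem.Set Int × Int × Option Char) (c : Char) : PySem.Set Int × Int × Option Char :=
  match st with
  | (runs, run, prev) =>
    if some c = prev then (runs, run + 1, prev)
    else (if run ≠ 0 then PySem.Set.add runs run else runs, 1, some c)

def run_lengths (s : List Char) : PySem.Set Int :=
  let st := s.foldl rlStep (PySem.Set.empty, 0, none)
  if st.2.1 ≠ 0 then PySem.Set.add st.1 st.2.1 else st.1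

def find_doubles_and_triples_alt (boxes : List String) : List (String × Int) :=
  let p := boxes.foldl (fun (acc : Int × Int) box =>
    let runs := run_lengths (PySem.List.sorted box.toList (fun x => x) false)
    let acc := if PySem.Set.contains runs 2 then (acc.1 + 1, acc.2) else acc
    if PySem.Set.contains runs 3 then (acc.1, acc.2 + 1) else acc) ((0 : Int), (0 : Int))
  [("doubles", p.1), ("triples", p.2)]

-- ===== PRECONDITION & SPEC =====
def Spec_find_doubles_and_triples (boxes : List String) (out : List (String × Int)) : Prop := out = find_doubles_and_triples_alt boxes
instance (boxes : List String) (out : List (String × Int)) : Decidable (Spec_find_doubles_and_triples boxes out) := by unfold Spec_find_doubles_and_triples; infer_instance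

-- ===== CLAIM (what is proved, stated in full; the proofs are below) =====
def Claim_equal_find_doubles_and_triples : Prop := ∀ (boxes : List String), Dom_find_doubles_and_triples boxes → Spec_find_doubles_and_triples boxes (find_doubles_and_triples boxes)

-- ===== LEMMAS AND PROOFS =====

-- scanning a block of equal letters just extends the current run
theorem rl_replicate (m : Nat) (runs : PySem.Set Int) (run : Int) (c : Char) :
    (List.replicate m c).foldl rlStep (runs, run, some c) = (runs, run + m, some c) := by
  induction m generalizing run with
  | zero => simp
  | succ k ih =>
    rw [List.replicate_succ, List.foldl_cons]
    have hstep : rlStep (runs, run, some c) c = (runs, run + 1, some c) := by simp [rlStep]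
    rw [hstep, ih]
    rw [Prod.mk.injEq, Prod.mk.injEq]
    refine ⟨rfl, by push_cast; ring, rfl⟩

-- in a sorted list, no copy of the head letter survives past the leading block
theorem not_mem_dropWhile_beq_of_sorted (c : Char) (l : List Char)
    (h : ∀ x ∈ l, c ≤ x) (hp : l.Pairwise (· ≤ ·)) : c ∉ l.dropWhile (· == c) := by
  induction l with
  | nil => simp
  | cons x xs ih =>
    rw [List.pairwise_cons] at hp
    rw [List.dropWhile_cons]
    by_cases hx : (x == c) = true
    · rw [if_pos hx]
      exact ih (fun y hy => h y (List.mem_cons_of_mem _ hy)) hp.2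
    · rw [if_neg hx]
      intro hc
      rcases List.mem_cons.mp hc with h1 | h2
      · exact hx (by simp [h1])
      · have hxc : x ≤ c := hp.1 c h2
        have hcx : c ≤ x := h x (List.mem_cons_self)
        exact hx (by simp [le_antisymm hxc hcx])

-- membership in the run-length set after scanning a sorted suffix, with the loop state generalized
theorem rl_fold_mem (N : Nat) : ∀ (t : List Char), t.length ≤ N → t.Pairwise (· ≤ ·) →
    ∀ (runs : PySem.Set Int) (run : Int) (p : Option Char),
    (p = none → run = 0) → (∀ a, p = some a → 0 < run ∧ a ∉ t) →
    ∀ n : Int,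
    ((n ∈ (let st := t.foldl rlStep (runs, run, p);
          if st.2.1 ≠ 0 then PySem.Set.add st.1 st.2.1 else st.1))
    ↔ (n ∈ runs ∨ (run ≠ 0 ∧ n = run) ∨ ∃ c ∈ t, ((t.count c : Int) = n))) := by
  induction N with
  | zero =>
    intro t hlen _ runs run p _ _ n
    have ht : t = [] := List.length_eq_zero_iff.mp (Nat.le_zero.mp hlen)
    subst ht
    by_cases hr : run ≠ 0
    · simp [hr, PySem.Set.mem_add]
    · simp at hr; simp [hr]
  | succ N ih =>
    intro t hlen hsort runs run p hnone hsome n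
    cases t with
    | nil =>
      by_cases hr : run ≠ 0
      · simp [hr, PySem.Set.mem_add]
      · simp at hr; simp [hr]
    | cons c rest =>
      -- decompose into the leading block of c's and the rest
      obtain ⟨k, hktake⟩ : ∃ k, (c :: rest).takeWhile (· == c) = List.replicate k c :=
        ⟨_, List.eq_replicate_of_mem (fun b hb => by simpa using List.mem_takeWhile_imp hb)⟩
      set drop := (c :: rest).dropWhile (· == c) with hdrop
      have hdecomp : c :: rest = List.replicate k c ++ drop := by
        rw [← hktake, hdrop, List.takeWhile_append_dropWhile]
      have hk1 : 1 ≤ k := by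
        by_contra h
        have hk0 : k = 0 := by omega
        rw [hk0, List.takeWhile_cons] at hktake
        simp at hktake
      rw [List.pairwise_cons] at hsort
      have hcle : ∀ x ∈ c :: rest, c ≤ x := by
        intro x hx
        rcases List.mem_cons.mp hx with h1 | h2
        · exact le_of_eq h1.symm
        · exact hsort.1 x h2
      have hcnot : c ∉ drop :=
        not_mem_dropWhile_beq_of_sorted c (c :: rest) hcle (List.pairwise_cons.mpr hsort)
      have hdsort : drop.Pairwise (· ≤ ·) :=
        List.Pairwise.sublist (List.dropWhile_sublist _) (List.pairwise_cons.mpr hsort)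
      have hlen2 : drop.length ≤ N := by
        have hl : (c :: rest).length = k + drop.length := by rw [hdecomp]; simp
        rw [List.length_cons] at hl hlen
        omega
      have hcount : (c :: rest).count c = k := by
        rw [hdecomp, List.count_append]
        simp [List.count_eq_zero.mpr hcnot]
      -- the first step closes any previous run and opens the run of c
      have hfirst : rlStep (runs, run, p) c
          = (if run ≠ 0 then PySem.Set.add runs run else runs, 1, some c) := by
        cases p with
        | none => simp [rlStep]
        | some a =>
          have ha := hsome a rfl
          have hac : a ≠ c := fun h => ha.2 (h ▸ List.mem_cons_self)
          simp [rlStep, Ne.symm hac]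
      have hrep : (List.replicate k c).foldl rlStep (runs, run, p)
          = (if run ≠ 0 then PySem.Set.add runs run else runs, (k : Int), some c) := by
        obtain ⟨k', rfl⟩ : ∃ k', k = k' + 1 := ⟨k - 1, by omega⟩
        rw [List.replicate_succ, List.foldl_cons, hfirst, rl_replicate]
        rw [Prod.mk.injEq, Prod.mk.injEq]
        refine ⟨rfl, by push_cast; ring, rfl⟩
      have hknz : (k : Int) ≠ 0 := by
        have := hk1; omega
      have hmain := ih drop hlen2 hdsort
        (if run ≠ 0 then PySem.Set.add runs run else runs) (k : Int) (some c)
        (by simp) (by intro a ha; cases ha; exact ⟨by exact_mod_cast hk1, hcnot⟩) n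
      conv_lhs => rw [hdecomp]
      rw [List.foldl_append, hrep]
      simp only at hmain ⊢
      rw [hmain]
      -- now pure membership algebra
      have hadd : ∀ m : Int, (n ∈ (if run ≠ 0 then PySem.Set.add runs run else runs))
          ↔ (n ∈ runs ∨ (run ≠ 0 ∧ n = run)) := by
        intro m
        by_cases hr : run ≠ 0
        · rw [if_pos hr, PySem.Set.mem_add]; tauto
        · rw [if_neg hr]; tauto
      rw [hadd 0]
      constructor
      · rintro ((h1 | h2) | (hkk | ⟨c', hc', hcc⟩))
        · exact Or.inl h1
        · exact Or.inr (Or.inl h2)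
        · refine Or.inr (Or.inr ⟨c, List.mem_cons_self, ?_⟩)
          rw [hcount]; omega
        · refine Or.inr (Or.inr ⟨c', ?_, ?_⟩)
          · rw [hdecomp]; exact List.mem_append_right _ hc'
          · have hne : c' ≠ c := fun h => hcnot (h ▸ hc')
            rw [hdecomp, List.count_append]
            rw [List.count_eq_zero.mpr (fun hx => hne (List.eq_of_mem_replicate hx))]
            simpa using hcc
      · rintro (h1 | (h2 | ⟨c', hc', hcc⟩))
        · exact Or.inl (Or.inl h1)
        · exact Or.inl (Or.inr h2)
        · rw [hdecomp] at hc'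
          rcases List.mem_append.mp hc' with h | h
          · have hcc' : c' = c := List.eq_of_mem_replicate h
            subst hcc'
            refine Or.inr (Or.inl ⟨hknz, ?_⟩)
            rw [hcount] at hcc; omega
          · have hne : c' ≠ c := fun hx => hcnot (hx ▸ h)
            refine Or.inr (Or.inr ⟨c', h, ?_⟩)
            rw [hdecomp, List.count_append] at hcc
            rw [List.count_eq_zero.mpr (fun hx => hne (List.eq_of_mem_replicate hx))] at hcc
            simpa using hcc

-- the run lengths of a sorted list are exactly the letter multiplicities
theorem mem_run_lengths (s : List Char) (hs : s.Pairwise (· ≤ ·)) (n : Int) :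
    n ∈ run_lengths s ↔ ∃ c ∈ s, (s.count c : Int) = n := by
  have h := rl_fold_mem s.length s le_rfl hs PySem.Set.empty 0 none
    (fun _ => rfl) (by intro a ha; cases ha) n
  simp only [run_lengths]
  rw [h]
  simp [PySem.Set.empty]

-- A's per-box "n in seen.values()" agrees with B's "n in run_lengths(sorted(box))"
theorem cond_eq (l : List Char) (n : Int) :
    ((l.foldl (fun d letter => d.modify letter 0 (· + 1)) PySem.Dict.empty : PySem.Dict Char Int).values.contains n)
      = PySem.Set.contains (run_lengths (PySem.List.sorted l (fun x => x) false)) n := by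
  rw [← PySem.Dict.counter_eq_foldl, Bool.eq_iff_iff]
  have hperm : (PySem.List.sorted l (fun x => x) false).Perm l := PySem.List.sorted_perm l _ false
  have hpw : (PySem.List.sorted l (fun x => x) false).Pairwise (· ≤ ·) := by
    simpa using PySem.List.sorted_pairwise l (fun x => x)
  rw [PySem.Set.contains_iff, mem_run_lengths _ hpw n]
  simp only [PySem.Dict.values, PySem.Dict.items_counter, List.map_map,
    List.contains_iff_exists_mem_beq, List.mem_map]
  constructor
  · rintro ⟨m, ⟨c, hc, rfl⟩, hm⟩
    simp only [PySem.Set.mem_ofList] at hc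
    simp only [beq_iff_eq] at hm
    refine ⟨c, hperm.mem_iff.mpr hc, ?_⟩
    rw [hperm.count_eq]
    exact hm.symm
  · rintro ⟨c, hc, hn⟩
    have hcl : c ∈ l := hperm.mem_iff.mp hc
    refine ⟨(l.count c : Int), ⟨c, ?_, rfl⟩, ?_⟩
    · simp only [PySem.Set.mem_ofList]; exact hcl
    · rw [hperm.count_eq] at hn
      simp [hn]

theorem insD (d t : Int) :
    (PySem.Dict.mk [("doubles", d), ("triples", t)]).insert "doubles"
      ((PySem.Dict.mk [("doubles", d), ("triples", t)]).getD "doubles" 0 + 1)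
    = PySem.Dict.mk [("doubles", d + 1), ("triples", t)] := by
  simp [PySem.Dict.insert, PySem.Dict.getD, PySem.Dict.get?, PySem.Dict.contains]

theorem insT (d t : Int) :
    (PySem.Dict.mk [("doubles", d), ("triples", t)]).insert "triples"
      ((PySem.Dict.mk [("doubles", d), ("triples", t)]).getD "triples" 0 + 1)
    = PySem.Dict.mk [("doubles", d), ("triples", t + 1)] := by
  simp [PySem.Dict.insert, PySem.Dict.getD, PySem.Dict.get?, PySem.Dict.contains]

-- A's dict-valued fold tracks B's pair-valued fold entry for entry
theorem repeats_fold (boxes : List String) (d t : Int) :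
    boxes.foldl (fun rep box =>
      let seen : PySem.Dict Char Int :=
        box.toList.foldl (fun d letter => d.modify letter 0 (· + 1)) PySem.Dict.empty
      let rep := if seen.values.contains 2 then rep.insert "doubles" (rep.getD "doubles" 0 + 1) else rep
      if seen.values.contains 3 then rep.insert "triples" (rep.getD "triples" 0 + 1) else rep)
      (PySem.Dict.mk [("doubles", d), ("triples", t)])
    = (let p := boxes.foldl (fun (acc : Int × Int) box =>
        let runs := run_lengths (PySem.List.sorted box.toList (fun x => x) false)
        let acc := if PySem.Set.contains runs 2 then (acc.1 + 1, acc.2) else acc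
        if PySem.Set.contains runs 3 then (acc.1, acc.2 + 1) else acc) (d, t);
      PySem.Dict.mk [("doubles", p.1), ("triples", p.2)]) := by
  induction boxes generalizing d t with
  | nil => simp
  | cons box rest ih =>
    simp only [List.foldl_cons, cond_eq] at ih ⊢
    split_ifs with h2 h3
    · rw [insD, insT]; exact ih (d + 1) (t + 1)
    · rw [insT]; exact ih d (t + 1)
    · rw [insD]; exact ih (d + 1) t
    · exact ih d t

-- ===== VERDICT (by name: the statement is the Claim_ definition above) =====
theorem find_doubles_and_triples_spec : Claim_equal_find_doubles_and_triples := by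
  intro boxes _
  unfold Spec_find_doubles_and_triples find_doubles_and_triples find_doubles_and_triples_alt
  simp only [repeats_fold]
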